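-- pv_equiv track=rewrite | github.com/NachiketKandari/InsightXpert-OpenEnv | server/grader.py | _execution_match_relaxed
-- ===== SOURCE A (Python) =====
-- def _execution_match(
--     gold_rows: list[tuple],
--     agent_rows: list[tuple],
-- ) -> bool:
--     """Strict EX: unordered set equality of result tuples.
--
--     Matches BIRD official evaluate_ex.py and InsightXpert executor.py.
--     No normalization — raw tuple comparison.
--     """
--     return set(tuple(r) for r in gold_rows) == set(tuple(r) for r in agent_rows)
--
-- def _execution_match_relaxed(
--     gold_rows: list[tuple],
--     agent_rows: list[tuple],
-- ) -> bool:
--     """Relaxed EX: tolerates extra columns in predicted results.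
--
--     From InsightXpert executor.py lines 156-193.
--     Returns True if the gold result columns appear as a contiguous
--     subsequence within the predicted result columns.
--     """
--     if not gold_rows:
--         return not agent_rows
--
--     gold_ncols = len(gold_rows[0])
--     agent_ncols = len(agent_rows[0]) if agent_rows else 0
--
--     if agent_ncols < gold_ncols:
--         return False
--
--     if agent_ncols == gold_ncols:
--         return _execution_match(gold_rows, agent_rows)
--
--     gold_set = set(tuple(r) for r in gold_rows)
--     # Slide a window of gold_ncols across predicted columns
--     for start in range(agent_ncols - gold_ncols + 1):
--         projected = set(tuple(r[start : start + gold_ncols]) for r in agent_rows)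
--         if projected == gold_set:
--             return True
--     return False
-- ===== SOURCE B (Python) =====
-- def _execution_match_relaxed(
--     gold_rows: list[tuple],
--     agent_rows: list[tuple],
-- ) -> bool:
--     """Relaxed EX via an inverted index: map each contiguous slice tuple to the
--     set of start offsets where it occurs, then a window matches iff its start
--     lies in every gold tuple's offset set and in no non-gold tuple's offset set."""
--     if not gold_rows:
--         return not agent_rows
--
--     gold_ncols = len(gold_rows[0])
--     agent_ncols = len(agent_rows[0]) if agent_rows else 0
--
--     if agent_ncols < gold_ncols:
--         return False
--
--     if agent_ncols == gold_ncols: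
--         return set(tuple(r) for r in gold_rows) == set(tuple(r) for r in agent_rows)
--
--     nwin = agent_ncols - gold_ncols + 1
--     occ = {}  # slice tuple -> set of starts where some agent row shows it
--     for r in agent_rows:
--         for s in range(nwin):
--             occ.setdefault(tuple(r[s : s + gold_ncols]), set()).add(s)
--
--     gold_set = set(tuple(r) for r in gold_rows)
--     good = set(range(nwin))
--     for t in gold_set:
--         good &= occ.get(t, set())
--     bad = set()
--     for t, ss in occ.items():
--         if t not in gold_set:
--             bad |= ss
--     return bool(good - bad)
-- ===== Notes on version B (the rewrite author's own statement) =====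
-- stated objective: alternative
-- what changed: B builds an inverted index mapping each contiguous column-slice tuple to the set of start offsets where it occurs, then decides the match by intersecting the offset sets of the gold tuples and subtracting offsets hit by any non-gold slice, instead of A's per-offset construction and comparison of projected row sets.
import Mathlib
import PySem

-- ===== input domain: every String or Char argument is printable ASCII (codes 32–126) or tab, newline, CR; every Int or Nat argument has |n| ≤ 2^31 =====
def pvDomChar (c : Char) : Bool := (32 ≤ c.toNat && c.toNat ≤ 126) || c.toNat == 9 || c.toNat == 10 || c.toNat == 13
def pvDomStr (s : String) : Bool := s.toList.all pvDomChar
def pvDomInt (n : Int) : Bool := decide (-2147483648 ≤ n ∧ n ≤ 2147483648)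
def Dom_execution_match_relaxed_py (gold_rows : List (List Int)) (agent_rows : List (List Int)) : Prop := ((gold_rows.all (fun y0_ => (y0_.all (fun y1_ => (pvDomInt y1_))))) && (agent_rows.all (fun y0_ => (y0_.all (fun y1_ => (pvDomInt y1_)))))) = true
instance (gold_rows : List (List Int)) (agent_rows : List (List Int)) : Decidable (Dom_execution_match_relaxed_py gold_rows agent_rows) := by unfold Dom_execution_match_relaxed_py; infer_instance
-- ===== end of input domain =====

-- B replaces A's per-window set comparisons by an inverted index (slice tuple -> set of start offsets),
-- deciding the match by intersecting the gold tuples' offset sets and removing offsets hit by non-gold slices.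

-- ===== PORT A =====
def execution_match_relaxed_py (gold_rows : List (List Int)) (agent_rows : List (List Int)) : Bool :=
  match gold_rows with
  | [] => decide (agent_rows = [])
  | g0 :: _ =>
    let gold_ncols : Int := (g0.length : Int)
    let agent_ncols : Int := match agent_rows with | [] => 0 | a0 :: _ => (a0.length : Int)
    if agent_ncols < gold_ncols then false
    else if agent_ncols = gold_ncols then
      PySem.Set.equal (PySem.Set.ofList gold_rows) (PySem.Set.ofList agent_rows)
    else
      let gold_set := PySem.Set.ofList gold_rows
      -- for start in range(...): if projected == gold_set: return True / return False  == any
      (PySem.List.pyRange 0 (agent_ncols - gold_ncols + 1) 1).any (fun start =>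
        PySem.Set.equal
          (PySem.Set.ofList (agent_rows.map (fun r =>
            PySem.List.slice r (some start) (some (start + gold_ncols)))))
          gold_set)

-- ===== PORT B =====
-- inner loop 'for s in range(nwin): occ.setdefault(tuple(r[s:s+gold_ncols]), set()).add(s)'
def pvOccRow (gn nwin : Int) (d : PySem.Dict (List Int) (PySem.Set Int)) (r : List Int) :
    PySem.Dict (List Int) (PySem.Set Int) :=
  (PySem.List.pyRange 0 nwin 1).foldl
    (fun d s => d.modify (PySem.List.slice r (some s) (some (s + gn))) PySem.Set.empty
      (fun w => PySem.Set.add w s)) d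

def execution_match_relaxed_py_alt (gold_rows : List (List Int)) (agent_rows : List (List Int)) : Bool :=
  match gold_rows with
  | [] => agent_rows.isEmpty
  | g0 :: _ =>
    let gn : Int := (g0.length : Int)
    let an : Int := match agent_rows with | [] => 0 | a0 :: _ => (a0.length : Int)
    if an < gn then false
    else if an = gn then
      PySem.Set.equal (PySem.Set.ofList gold_rows) (PySem.Set.ofList agent_rows)
    else
      let nwin : Int := an - gn + 1
      let occ := agent_rows.foldl (pvOccRow gn nwin) PySem.Dict.empty
      let gold_set := PySem.Set.ofList gold_rows
      -- good = set(range(nwin)); for t in gold_set: good &= occ.get(t, set())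
      let good := gold_set.foldl
        (fun g t => PySem.Set.inter g (occ.getD t PySem.Set.empty))
        (PySem.Set.ofList (PySem.List.pyRange 0 nwin 1))
      -- bad = set(); for t, ss in occ.items(): if t not in gold_set: bad |= ss
      let bad := occ.items.foldl
        (fun b p => if gold_set.contains p.1 then b else PySem.Set.union b p.2)
        (PySem.Set.empty)
      !(PySem.Set.diff good bad).isEmpty

-- ===== PRECONDITION & SPEC =====
def Spec_execution_match_relaxed_py (gold_rows : List (List Int)) (agent_rows : List (List Int)) (out : Bool) : Prop := out = execution_match_relaxed_py_alt gold_rows agent_rows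
instance (gold_rows : List (List Int)) (agent_rows : List (List Int)) (out : Bool) : Decidable (Spec_execution_match_relaxed_py gold_rows agent_rows out) := by unfold Spec_execution_match_relaxed_py; infer_instance

-- ===== CLAIM (what is proved, stated in full; the proofs are below) =====
def Claim_equal_execution_match_relaxed_py : Prop := ∀ (gold_rows : List (List Int)) (agent_rows : List (List Int)), Dom_execution_match_relaxed_py gold_rows agent_rows → Spec_execution_match_relaxed_py gold_rows agent_rows (execution_match_relaxed_py gold_rows agent_rows)

-- ===== LEMMAS AND PROOFS =====

-- membership in the inner (per-row) fold of the occurrence dict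
theorem pv_mem_getD_modfold (gn : Int) (r : List Int) (ss : List Int) :
    ∀ (d : PySem.Dict (List Int) (PySem.Set Int)) (t : List Int) (x : Int),
      x ∈ (ss.foldl (fun d s => d.modify (PySem.List.slice r (some s) (some (s + gn))) PySem.Set.empty
            (fun w => PySem.Set.add w s)) d).getD t PySem.Set.empty
      ↔ x ∈ d.getD t PySem.Set.empty ∨ ∃ s ∈ ss, PySem.List.slice r (some s) (some (s + gn)) = t ∧ x = s := by
  induction ss with
  | nil => intro d t x; simp
  | cons s ss ih =>
    intro d t x
    rw [List.foldl_cons, ih]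
    have hstep : x ∈ (d.modify (PySem.List.slice r (some s) (some (s + gn))) PySem.Set.empty
        (fun w => PySem.Set.add w s)).getD t PySem.Set.empty
        ↔ x ∈ d.getD t PySem.Set.empty ∨ (PySem.List.slice r (some s) (some (s + gn)) = t ∧ x = s) := by
      unfold PySem.Dict.modify
      by_cases hk : PySem.List.slice r (some s) (some (s + gn)) = t
      · rw [hk, PySem.Dict.getD_insert_self, PySem.Set.mem_add]
        tauto
      · rw [PySem.Dict.getD_insert_of_ne _ _ _ (fun h => hk h.symm)]
        tauto
    rw [hstep]
    simp only [List.exists_mem_cons_iff]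
    tauto

-- membership in the occurrence dict built over all rows
theorem pv_mem_getD_occ (gn nwin : Int) (rows : List (List Int)) :
    ∀ (d : PySem.Dict (List Int) (PySem.Set Int)) (t : List Int) (x : Int),
      x ∈ (rows.foldl (pvOccRow gn nwin) d).getD t PySem.Set.empty
      ↔ x ∈ d.getD t PySem.Set.empty ∨
          ∃ r ∈ rows, x ∈ PySem.List.pyRange 0 nwin 1 ∧ PySem.List.slice r (some x) (some (x + gn)) = t := by
  induction rows with
  | nil => intro d t x; simp
  | cons r rows ih =>
    intro d t x
    rw [List.foldl_cons, ih]
    unfold pvOccRow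
    rw [pv_mem_getD_modfold]
    simp only [List.exists_mem_cons_iff]
    constructor
    · rintro ((h | ⟨s, hs, hsl, rfl⟩) | ⟨r', hr', hx, hsl⟩)
      · exact Or.inl h
      · exact Or.inr (Or.inl ⟨hs, hsl⟩)
      · exact Or.inr (Or.inr ⟨r', hr', hx, hsl⟩)
    · rintro (h | ⟨hx, hsl⟩ | ⟨r', hr', hx, hsl⟩)
      · exact Or.inl (Or.inl h)
      · exact Or.inl (Or.inr ⟨x, hx, hsl, rfl⟩)
      · exact Or.inr ⟨r', hr', hx, hsl⟩

-- the occurrence dict has duplicate-free keys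
theorem pv_nodup_keys_occ (gn nwin : Int) (rows : List (List Int)) :
    ∀ (d : PySem.Dict (List Int) (PySem.Set Int)), d.keys.Nodup →
      (rows.foldl (pvOccRow gn nwin) d).keys.Nodup := by
  induction rows with
  | nil => intro d hd; simpa using hd
  | cons r rows ih =>
    intro d hd
    rw [List.foldl_cons]
    exact ih _ (PySem.Dict.nodup_keys_foldl_modify_key _
      (fun s => PySem.List.slice r (some s) (some (s + gn))) PySem.Set.empty
      (fun _ s w => PySem.Set.add w s) d hd)

-- membership in the 'good' intersection fold
theorem pv_mem_goodfold (occ : PySem.Dict (List Int) (PySem.Set Int)) (ts : List (List Int)) :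
    ∀ (g : PySem.Set Int) (x : Int),
      x ∈ ts.foldl (fun g t => PySem.Set.inter g (occ.getD t PySem.Set.empty)) g
      ↔ x ∈ g ∧ ∀ t ∈ ts, x ∈ occ.getD t PySem.Set.empty := by
  induction ts with
  | nil => intro g x; simp
  | cons t ts ih =>
    intro g x
    rw [List.foldl_cons, ih, PySem.Set.mem_inter]
    simp only [List.forall_mem_cons]
    tauto

-- membership in the 'bad' union fold over the dict's items
theorem pv_mem_badfold (gold_set : PySem.Set (List Int)) (ps : List (List Int × PySem.Set Int)) :
    ∀ (b : PySem.Set Int) (x : Int),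
      x ∈ ps.foldl (fun b p => if gold_set.contains p.1 then b else PySem.Set.union b p.2) b
      ↔ x ∈ b ∨ ∃ p ∈ ps, p.1 ∉ gold_set ∧ x ∈ p.2 := by
  induction ps with
  | nil => intro b x; simp
  | cons p ps ih =>
    intro b x
    rw [List.foldl_cons, ih]
    simp only [List.exists_mem_cons_iff]
    by_cases hp : p.1 ∈ gold_set
    · rw [if_pos ((PySem.Set.contains_iff gold_set p.1).mpr hp)]
      tauto
    · rw [if_neg (fun hc => hp ((PySem.Set.contains_iff gold_set p.1).mp hc))]
      rw [PySem.Set.mem_union]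
      tauto

-- the sliding-window branch: A's window scan equals B's inverted-index decision
theorem pv_branch (gn nwin : Int) (gl rows : List (List Int)) :
    ((PySem.List.pyRange 0 nwin 1).any (fun start =>
      PySem.Set.equal
        (PySem.Set.ofList (rows.map (fun r => PySem.List.slice r (some start) (some (start + gn)))))
        (PySem.Set.ofList gl)))
    = !(PySem.Set.diff
        ((PySem.Set.ofList gl).foldl
          (fun g t => PySem.Set.inter g
            ((rows.foldl (pvOccRow gn nwin) PySem.Dict.empty).getD t PySem.Set.empty))
          (PySem.Set.ofList (PySem.List.pyRange 0 nwin 1)))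
        ((rows.foldl (pvOccRow gn nwin) PySem.Dict.empty).items.foldl
          (fun b p => if (PySem.Set.ofList gl).contains p.1 then b else PySem.Set.union b p.2)
          PySem.Set.empty)).isEmpty := by
  have hkeys : (rows.foldl (pvOccRow gn nwin) PySem.Dict.empty).keys.Nodup :=
    pv_nodup_keys_occ gn nwin rows PySem.Dict.empty (by simp [PySem.Dict.keys_empty])
  have hmemocc : ∀ (t : List Int) (x : Int),
      x ∈ (rows.foldl (pvOccRow gn nwin) PySem.Dict.empty).getD t PySem.Set.empty
      ↔ ∃ r ∈ rows, x ∈ PySem.List.pyRange 0 nwin 1 ∧ PySem.List.slice r (some x) (some (x + gn)) = t := by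
    intro t x
    rw [pv_mem_getD_occ]
    simp [PySem.Dict.getD, PySem.Dict.get?, PySem.Dict.empty]
  rw [Bool.eq_iff_iff]
  simp only [List.any_eq_true, Bool.not_eq_true', List.isEmpty_eq_false_iff_exists_mem]
  constructor
  · rintro ⟨s, hs, heq⟩
    simp only [PySem.Set.equal, Bool.and_eq_true, PySem.Set.issubset_iff] at heq
    obtain ⟨hsub, hsup⟩ := heq
    refine ⟨s, (PySem.Set.mem_diff _ _ _).mpr ⟨?_, ?_⟩⟩
    · rw [pv_mem_goodfold]
      refine ⟨by simpa [PySem.Set.mem_ofList] using hs, ?_⟩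
      intro t ht
      rw [hmemocc]
      obtain ⟨r, hr, hrs⟩ := by
        have := hsup t ht
        simpa [PySem.Set.mem_ofList, List.mem_map] using this
      exact ⟨r, hr, hs, hrs⟩
    · intro hbad
      rw [pv_mem_badfold] at hbad
      rcases hbad with h | ⟨⟨t0, ss0⟩, hp, hpg, hsp⟩
      · simp [PySem.Set.empty] at h
      · have hget : (rows.foldl (pvOccRow gn nwin) PySem.Dict.empty).get? t0 = some ss0 :=
          (PySem.Dict.get?_eq_some_iff_mem_items _ t0 ss0 hkeys).mpr hp
        have hmem : s ∈ (rows.foldl (pvOccRow gn nwin) PySem.Dict.empty).getD t0 PySem.Set.empty := by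
          simp only [PySem.Dict.getD, hget, Option.getD_some]
          exact hsp
        rw [hmemocc] at hmem
        obtain ⟨r, hr, _, hsl⟩ := hmem
        refine hpg ?_
        have := hsub (PySem.List.slice r (some s) (some (s + gn)))
          (by simp only [PySem.Set.mem_ofList, List.mem_map]; exact ⟨r, hr, rfl⟩)
        rwa [hsl] at this
  · rintro ⟨s, hsd⟩
    rw [PySem.Set.mem_diff] at hsd
    obtain ⟨hgood, hnbad⟩ := hsd
    rw [pv_mem_goodfold] at hgood
    obtain ⟨hsr, hcov⟩ := hgood
    rw [PySem.Set.mem_ofList] at hsr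
    refine ⟨s, hsr, ?_⟩
    simp only [PySem.Set.equal, Bool.and_eq_true, PySem.Set.issubset_iff]
    constructor
    · -- every projected slice is a gold tuple, else s would be in 'bad'
      intro t ht
      simp only [PySem.Set.mem_ofList, List.mem_map] at ht
      obtain ⟨r, hr, rfl⟩ := ht
      by_contra htg
      apply hnbad
      rw [pv_mem_badfold]
      have hmem : s ∈ (rows.foldl (pvOccRow gn nwin) PySem.Dict.empty).getD
          (PySem.List.slice r (some s) (some (s + gn))) PySem.Set.empty :=
        (hmemocc _ s).mpr ⟨r, hr, hsr, rfl⟩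
      obtain ⟨ss, hg, hss⟩ : ∃ ss, (rows.foldl (pvOccRow gn nwin) PySem.Dict.empty).get?
          (PySem.List.slice r (some s) (some (s + gn))) = some ss ∧ s ∈ ss := by
        cases hg : (rows.foldl (pvOccRow gn nwin) PySem.Dict.empty).get?
            (PySem.List.slice r (some s) (some (s + gn))) with
        | none => rw [PySem.Dict.getD, hg] at hmem; simp [PySem.Set.empty] at hmem
        | some ss => exact ⟨ss, rfl, by rwa [PySem.Dict.getD, hg, Option.getD_some] at hmem⟩
      exact Or.inr ⟨(_, ss), PySem.Dict.mem_items_of_get?_eq_some _ hg, htg, hss⟩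
    · -- every gold tuple appears as a slice at s
      intro t ht
      obtain ⟨r, hr, _, hsl⟩ := (hmemocc t s).mp (hcov t ht)
      simp only [PySem.Set.mem_ofList, List.mem_map]
      exact ⟨r, hr, hsl⟩

-- ===== VERDICT (by name: the statement is the Claim_ definition above) =====
theorem execution_match_relaxed_py_spec : Claim_equal_execution_match_relaxed_py := by
  intro gold_rows agent_rows _
  unfold Spec_execution_match_relaxed_py execution_match_relaxed_py execution_match_relaxed_py_alt
  cases gold_rows with
  | nil => cases agent_rows <;> simp
  | cons g0 gs =>
    simp only
    split_ifs with h1 h2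
    · rfl
    · rfl
    · exact pv_branch (g0.length : Int) _ (g0 :: gs) agent_rows
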